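-- pv_equiv track=rewrite | github.com/misut/ps-hacker-rank | questions/prime-string/py/main.py | countPrimeStrings
-- ===== SOURCE A (Python) =====
-- def generate_primes(end: int) -> list[bool]:
--     primes = [True for prime in range(0, end + 1)]
--     primes[0] = primes[1] = False
--     n = 2
--     while n < len(primes):
--         if primes[n]:
--             m = 2
--             while n * m <= end:
--                 primes[n * m] = False
--                 m += 1
--         n += 1
--     return primes
--
-- def countPrimeStrings(s: str) -> int:
--     primes = generate_primes(1000000)
--     sols = [0 for _ in range(len(s) + 1)]
--     sols[0] = 1
--     for end in range(1, len(s) + 1):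
--         for stt in range(end - 1, max(-1, end - 7), -1):
--             num = int(s[stt:end])
--             if num > 1000000:
--                 break
--             if s[stt] == "0":
--                 continue
--             if primes[num]:
--                 sols[end] += sols[stt]
--                 sols[end] %= 1000000007
--     return sols[-1]
-- ===== SOURCE B (Python) =====
-- def generate_primes(end: int) -> list[bool]:
--     primes = [True for prime in range(0, end + 1)]
--     primes[0] = primes[1] = False
--     n = 2
--     while n < len(primes):
--         if primes[n]:
--             m = 2
--             while n * m <= end:
--                 primes[n * m] = False
--                 m += 1
--         n += 1
--     return primes
--
-- def countPrimeStrings(s: str) -> int: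
--     # push DP: scatter sols[stt] forward into sols[end]; number built digit-by-digit
--     primes = generate_primes(1000000)
--     n = len(s)
--     sols = [0] * (n + 1)
--     sols[0] = 1
--     for stt in range(n):
--         if s[stt] == "0":
--             continue
--         num = 0
--         for end in range(stt + 1, min(n, stt + 6) + 1):
--             num = num * 10 + (ord(s[end - 1]) - 48)
--             if primes[num]:
--                 sols[end] = (sols[end] + sols[stt]) % 1000000007
--     return sols[n]
-- ===== Notes on version B (the rewrite author's own statement) =====
-- stated objective: alternative
-- what changed: The pull DP (for each end, sum sols[stt] over up-to-6 preceding starts, re-parsing each substring with int(s[stt:end])) is replaced by a push DP that scatters sols[stt] forward into sols[end] and builds each candidate number incrementally digit by digit instead of slicing and parsing.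
import Mathlib
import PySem

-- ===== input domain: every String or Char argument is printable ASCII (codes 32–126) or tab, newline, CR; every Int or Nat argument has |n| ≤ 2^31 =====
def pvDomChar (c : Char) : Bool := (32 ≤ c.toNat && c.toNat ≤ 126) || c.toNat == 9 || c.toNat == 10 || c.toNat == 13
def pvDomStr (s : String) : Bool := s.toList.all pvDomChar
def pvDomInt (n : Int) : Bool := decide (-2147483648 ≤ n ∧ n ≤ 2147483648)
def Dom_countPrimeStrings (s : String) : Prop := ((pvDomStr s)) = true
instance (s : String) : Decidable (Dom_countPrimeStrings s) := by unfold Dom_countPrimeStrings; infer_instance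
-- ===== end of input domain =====

-- B replaces A's pull DP (for each end, sum over up-to-6 earlier starts, re-parsing each substring
-- with int()) by a push DP that scatters sols[stt] forward, building each number digit by digit
-- (objective: alternative decomposition, same asymptotic cost).


-- ===== PORT A =====
-- generate_primes: the two Python while-loops as structural recursion on a fuel counter that
-- only makes them total (fuel is chosen ≥ the number of iterations, so it never runs out).
def pvSieveInner (fuel e n m : Nat) (primes : Array Bool) : Array Bool :=
  match fuel with
  | 0 => primes
  | fuel + 1 =>
    if n * m ≤ e then pvSieveInner fuel e n (m + 1) (primes.set! (n * m) false) else primes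

def pvSieveOuter (fuel e n : Nat) (primes : Array Bool) : Array Bool :=
  match fuel with
  | 0 => primes
  | fuel + 1 =>
    if n < primes.size then
      pvSieveOuter fuel e (n + 1) (if primes[n]! then pvSieveInner (e + 1) e n 2 primes else primes)
    else primes

def generatePrimes (e : Nat) : Array Bool :=
  pvSieveOuter (e + 1) e 2 (((Array.replicate (e + 1) true).set! 0 false).set! 1 false)

-- int(sub), ported by hand (PySem.Int.ofStr?'s digit evaluator is a private definition, so it cannot
-- be reasoned about): exact on every substring reachable under Pre_ (nonempty, decimal digits only);
-- none = ValueError elsewhere.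
def pvDigitsVal (ds : List Char) : Int := ds.foldl (fun a c => 10 * a + ((c.toNat : Int) - 48)) 0

def pvIntDigits? (ds : List Char) : Option Int :=
  if ds ≠ [] ∧ ds.all Char.isDigit then some (pvDigitsVal ds) else none

-- the inner 'for stt in range(end-1, max(-1, end-7), -1)' loop of A; v is sols[end]
def pvInnerA (cs : List Char) (primes : Array Bool) (sols : List Int) (e : Int) :
    List Int → Int → Int
  | [], v => v
  | stt :: rest, v =>
    match pvIntDigits? (PySem.List.slice cs (some stt) (some e)) with
    | none => v  -- int() raises ValueError here; unreachable under Pre_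
    | some num =>
      if num > 1000000 then v  -- break
      else if PySem.List.pyGetD cs stt ' ' == '0' then pvInnerA cs primes sols e rest v  -- continue
      else if primes.getD num.toNat false then  -- primes[num]: in bounds, 0 ≤ num ≤ 1000000 here
        pvInnerA cs primes sols e rest (PySem.Int.mod (v + PySem.List.pyGetD sols stt 0) 1000000007)
      else pvInnerA cs primes sols e rest v

def countPrimeStrings (s : String) : Int :=
  let primes := generatePrimes 1000000
  let cs := s.toList
  let n := cs.length
  let sols0 := (List.replicate (n + 1) (0 : Int)).set 0 1
  let sols := (PySem.List.pyRange 1 ((n : Int) + 1) 1).foldl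
      (fun sols e => PySem.List.pySetD sols e
        (pvInnerA cs primes sols e (PySem.List.pyRange (e - 1) (max (-1) (e - 7)) (-1))
          (PySem.List.pyGetD sols e 0))) sols0
  PySem.List.pyGetD sols (-1) 0

-- ===== PORT B =====
-- the inner 'for end in range(stt+1, min(n, stt+6)+1)' loop of B; num is built digit by digit
def pvInnerB (cs : List Char) (primes : Array Bool) (stt : Int) :
    List Int → Int → List Int → List Int
  | [], _, sols => sols
  | e :: rest, num, sols =>
    let num' := num * 10 + (((PySem.List.pyGetD cs (e - 1) ' ').toNat : Int) - 48)
    if primes.getD num'.toNat false then  -- primes[num]: in bounds under Pre_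
      pvInnerB cs primes stt rest num' (PySem.List.pySetD sols e
        (PySem.Int.mod (PySem.List.pyGetD sols e 0 + PySem.List.pyGetD sols stt 0) 1000000007))
    else pvInnerB cs primes stt rest num' sols

def countPrimeStrings_alt (s : String) : Int :=
  let primes := generatePrimes 1000000
  let cs := s.toList
  let n := cs.length
  let sols0 := (List.replicate (n + 1) (0 : Int)).set 0 1
  let sols := (PySem.List.pyRange 0 (n : Int) 1).foldl
      (fun sols stt =>
        if PySem.List.pyGetD cs stt ' ' == '0' then sols  -- continue
        else pvInnerB cs primes stt
          (PySem.List.pyRange (stt + 1) (min (n : Int) (stt + 6) + 1) 1) 0 sols) sols0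
  PySem.List.pyGetD sols (n : Int) 0

-- ===== PRECONDITION & SPEC =====
-- A raises ValueError (int() of a non-digit substring) on any other string; the very first
-- inner-loop step parses each single character, so A returns exactly on all-digit strings.
def Pre_countPrimeStrings (s : String) : Prop := s.toList.all Char.isDigit = true
instance (s : String) : Decidable (Pre_countPrimeStrings s) := by
  unfold Pre_countPrimeStrings; infer_instance

def pvWitness_countPrimeStrings : String := "237"

def Spec_countPrimeStrings (s : String) (out : Int) : Prop := out = countPrimeStrings_alt s
instance (s : String) (out : Int) : Decidable (Spec_countPrimeStrings s out) := by
  unfold Spec_countPrimeStrings; infer_instance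

-- ===== CLAIM (what is proved, stated in full; the proofs are below) =====
def Claim_equal_countPrimeStrings : Prop := ∀ (s : String), Dom_countPrimeStrings s →
  Pre_countPrimeStrings s → Spec_countPrimeStrings s (countPrimeStrings s)

-- ===== LEMMAS AND PROOFS =====

def pvM : Int := 1000000007

-- descending window of candidate starts for a given end e: [e-1, e-2, ..., max(0, e-6)]
def pvWndD (e : Nat) : List Nat := (List.range (min e 6)).map (fun k => e - 1 - k)

-- whether the substring s[stt:e] contributes: no leading zero, and its value is marked prime
def pvOk (cs : List Char) (primes : Array Bool) (stt e : Nat) : Bool :=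
  !(cs.getD stt ' ' == '0') &&
    primes.getD (pvDigitsVal ((cs.drop stt).take (e - stt))).toNat false

-- the common DP value: number of prime decompositions of s[0:e] (mod pvM)
def pvF (cs : List Char) (primes : Array Bool) : Nat → Int
  | 0 => 1
  | e + 1 => PySem.Int.mod ((pvWndD (e + 1)).attach.map
      (fun x => if pvOk cs primes x.1 (e + 1) then pvF cs primes x.1 else 0)).sum pvM
decreasing_by
  have hx := x.2
  simp only [pvWndD, List.mem_map, List.mem_range] at hx
  omega

def pvG (cs : List Char) (primes : Array Bool) (j stt : Nat) : Int :=
  if pvOk cs primes stt j then pvF cs primes stt else 0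

lemma pvF_succ (cs : List Char) (primes : Array Bool) (e : Nat) :
    pvF cs primes (e + 1) = PySem.Int.mod ((pvWndD (e + 1)).map (pvG cs primes (e + 1))).sum pvM := by
  rw [pvF]
  congr 1
  rw [List.attach_map_val (l := pvWndD (e+1)) (f := fun stt => if pvOk cs primes stt (e + 1) then pvF cs primes stt else 0)]
  rfl

lemma mem_pvWndD {stt e : Nat} : stt ∈ pvWndD e ↔ stt < e ∧ e ≤ stt + 6 := by
  simp only [pvWndD, List.mem_map, List.mem_range]
  constructor
  · rintro ⟨k, hk, rfl⟩; omega
  · rintro ⟨h1, h2⟩; exact ⟨e - 1 - stt, by omega, by omega⟩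

lemma nodup_pvWndD (e : Nat) : (pvWndD e).Nodup := by
  refine (List.nodup_map_iff_inj_on List.nodup_range).mpr ?_
  intro x hx y hy hxy
  simp only [List.mem_range] at hx hy
  omega

lemma pv_mod_absorb (t a : Int) : PySem.Int.mod (PySem.Int.mod t pvM + a) pvM = PySem.Int.mod (t + a) pvM := by
  have hM : (0 : Int) < pvM := by norm_num [pvM]
  simp only [PySem.Int.mod_eq_emod_of_pos hM]
  exact Int.emod_add_emod t pvM a

lemma pv_mod_zero : PySem.Int.mod 0 pvM = 0 := by decide

-- a fold of "if p then v := (v + g x) % pvM" is the mod of the sum of contributions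
lemma pv_foldl_mod (p : Nat → Bool) (g : Nat → Int) (l : List Nat) (t : Int) :
    l.foldl (fun v stt => if p stt then PySem.Int.mod (v + g stt) pvM else v) (PySem.Int.mod t pvM)
      = PySem.Int.mod (t + (l.map (fun stt => if p stt then g stt else 0)).sum) pvM := by
  induction l generalizing t with
  | nil => simp
  | cons x xs ih =>
    by_cases hp : p x
    · simp only [List.foldl_cons, hp, if_true, pv_mod_absorb]
      rw [ih (t + g x)]
      simp only [List.map_cons, List.sum_cons, hp, if_true]
      ring_nf
    · simp only [List.foldl_cons, hp, if_false, Bool.false_eq_true]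
      rw [ih t]
      simp [hp]

lemma pv_sum_filter_lt_succ (l : List Nat) (hnd : l.Nodup) (k : Nat) (g : Nat → Int) :
    ((l.filter (fun x => decide (x < k + 1))).map g).sum
      = ((l.filter (fun x => decide (x < k))).map g).sum + (if k ∈ l then g k else 0) := by
  induction l with
  | nil => simp
  | cons x xs ih =>
    have hnd' : xs.Nodup := hnd.of_cons
    have hx : x ∉ xs := (List.nodup_cons.mp hnd).1
    by_cases hxk : x = k
    · subst hxk
      have h1 : decide (x < x + 1) = true := by simp
      have h2 : decide (x < x) = false := by simp
      simp only [List.filter_cons, h1, h2, if_true, List.map_cons, List.sum_cons,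
        List.mem_cons, true_or, if_true]
      rw [ih hnd']
      simp [hx]
      ring
    · have hkx : ¬ k = x := fun h => hxk h.symm
      have hif : (if k ∈ x :: xs then g k else 0) = (if k ∈ xs then g k else 0) := by
        by_cases hm : k ∈ xs
        · simp [List.mem_cons, hm]
        · simp [List.mem_cons, hm, hkx]
      by_cases hlt : x < k
      · have h1 : decide (x < k + 1) = true := by simp; omega
        have h2 : decide (x < k) = true := by simp [hlt]
        simp only [List.filter_cons, h1, h2, if_true, List.map_cons, List.sum_cons]
        rw [ih hnd', hif]
        ring
      · have h1 : decide (x < k + 1) = false := by simp; omega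
        have h2 : decide (x < k) = false := by simp; omega
        simp only [List.filter_cons, h1, h2, if_false, Bool.false_eq_true]
        rw [ih hnd', hif]

-- digit facts
lemma pv_digit_bounds {c : Char} (h : c.isDigit = true) : 48 ≤ c.toNat ∧ c.toNat ≤ 57 := by
  simp [Char.isDigit] at h
  exact h

lemma pvDigitsVal_aux (ds : List Char) (a : Int) (h : ds.all Char.isDigit = true) (ha : 0 ≤ a) :
    0 ≤ ds.foldl (fun a c => 10 * a + ((c.toNat : Int) - 48)) a ∧
      ds.foldl (fun a c => 10 * a + ((c.toNat : Int) - 48)) a < (a + 1) * 10 ^ ds.length := by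
  induction ds generalizing a with
  | nil => simpa using by omega
  | cons c t ih =>
    simp only [List.all_cons, Bool.and_eq_true] at h
    have hc := pv_digit_bounds h.1
    have hc1 := hc.1
    have hc2 := hc.2
    have hd0 : (0:Int) ≤ (c.toNat : Int) - 48 := by omega
    have hd9 : ((c.toNat : Int) - 48) ≤ 9 := by omega
    have ha' : 0 ≤ 10 * a + ((c.toNat : Int) - 48) := by omega
    obtain ⟨ih1, ih2⟩ := ih (10 * a + ((c.toNat : Int) - 48)) h.2 ha'
    refine ⟨ih1, ?_⟩
    simp only [List.foldl_cons, List.length_cons]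
    calc List.foldl _ (10 * a + ((c.toNat : Int) - 48)) t
        < (10 * a + ((c.toNat : Int) - 48) + 1) * 10 ^ t.length := ih2
      _ ≤ (a + 1) * 10 ^ (t.length + 1) := by
          have h10 : (0:Int) < 10 ^ t.length := by positivity
          have : 10 * a + ((c.toNat : Int) - 48) + 1 ≤ 10 * (a + 1) := by omega
          calc (10 * a + ((c.toNat : Int) - 48) + 1) * 10 ^ t.length
              ≤ (10 * (a + 1)) * 10 ^ t.length := by
                exact mul_le_mul_of_nonneg_right this (le_of_lt h10)
            _ = (a + 1) * 10 ^ (t.length + 1) := by ring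

lemma pvDigitsVal_bounds (ds : List Char) (h : ds.all Char.isDigit = true) :
    0 ≤ pvDigitsVal ds ∧ pvDigitsVal ds < 10 ^ ds.length := by
  have := pvDigitsVal_aux ds 0 h le_rfl
  simpa [pvDigitsVal] using this

lemma pvDigitsVal_snoc (ds : List Char) (c : Char) :
    pvDigitsVal (ds ++ [c]) = 10 * pvDigitsVal ds + ((c.toNat : Int) - 48) := by
  simp [pvDigitsVal, List.foldl_append]

-- the substring s[stt:e] as a list, all digits and nonempty
lemma pv_sub_digits (cs : List Char) (hd : cs.all Char.isDigit = true) (stt m : Nat) :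
    ((cs.drop stt).take m).all Char.isDigit = true := by
  rw [List.all_eq_true] at hd ⊢
  intro c hc
  exact hd c (List.mem_of_mem_drop (List.mem_of_mem_take hc))

-- ===== A-side =====

abbrev pvStepA (cs : List Char) (primes : Array Bool) (sols : List Int) (e : Nat) : Int → Nat → Int :=
  fun v stt => if pvOk cs primes stt e then PySem.Int.mod (v + sols.getD stt 0) pvM else v

lemma pvInnerA_eq_foldl (cs : List Char) (primes : Array Bool) (sols : List Int)
    (hd : cs.all Char.isDigit = true) (e : Nat) (he : e ≤ cs.length)
    (l : List Nat) (hl : ∀ stt ∈ l, stt < e ∧ e ≤ stt + 6) (v : Int) :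
    pvInnerA cs primes sols (e : Int) (l.map (fun stt : Nat => (stt : Int))) v
      = l.foldl (pvStepA cs primes sols e) v := by
  induction l generalizing v with
  | nil => rfl
  | cons stt rest ih =>
    obtain ⟨h1, h2⟩ := hl stt List.mem_cons_self
    have hl' : ∀ x ∈ rest, x < e ∧ e ≤ x + 6 := fun x hx => hl x (List.mem_cons_of_mem _ hx)
    have hslice : PySem.List.slice cs (some (stt : Int)) (some (e : Int))
        = (cs.drop stt).take (e - stt) := PySem.List.slice_natCast cs stt e
    have hsubd := pv_sub_digits cs hd stt (e - stt)
    have hlen : ((cs.drop stt).take (e - stt)).length = e - stt := by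
      simp [List.length_take, List.length_drop]; omega
    have hne : (cs.drop stt).take (e - stt) ≠ [] := by
      intro hh; rw [← List.length_eq_zero_iff] at hh; omega
    have hparse : pvIntDigits? ((cs.drop stt).take (e - stt))
        = some (pvDigitsVal ((cs.drop stt).take (e - stt))) := by
      simp [pvIntDigits?, hne, hsubd]
    obtain ⟨hnn, hub⟩ := pvDigitsVal_bounds _ hsubd
    have hub' : pvDigitsVal ((cs.drop stt).take (e - stt)) ≤ 1000000 := by
      have : (10:Int) ^ ((cs.drop stt).take (e - stt)).length ≤ 10 ^ 6 := by
        apply pow_le_pow_right₀ (by norm_num)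
        omega
      omega
    simp only [List.map_cons, pvInnerA, hslice, hparse]
    have hbreak : ¬ (pvDigitsVal ((cs.drop stt).take (e - stt)) > 1000000) := by omega
    rw [if_neg hbreak]
    have hget : PySem.List.pyGetD cs (stt : Int) ' ' = cs.getD stt ' ' := by
      simp
    have hgets : PySem.List.pyGetD sols (stt : Int) 0 = sols.getD stt 0 := by
      simp
    rw [hget, hgets]
    cases hb0 : (cs.getD stt ' ' == '0') with
    | true =>
      have hok : pvOk cs primes stt e = false := by unfold pvOk; rw [hb0]; rfl
      rw [if_pos rfl, ih hl']
      simp only [List.foldl_cons, pvStepA, hok, Bool.false_eq_true, if_false]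
    | false =>
      rw [if_neg (by exact Bool.false_ne_true)]
      cases hbp : primes.getD (pvDigitsVal ((cs.drop stt).take (e - stt))).toNat false with
      | true =>
        have hok : pvOk cs primes stt e = true := by unfold pvOk; rw [hb0, hbp]; rfl
        rw [if_pos rfl, ih hl']
        simp only [List.foldl_cons, pvStepA, hok, if_true]
        rfl
      | false =>
        have hok : pvOk cs primes stt e = false := by unfold pvOk; rw [hb0, hbp]; rfl
        rw [if_neg (by exact Bool.false_ne_true), ih hl']
        simp only [List.foldl_cons, pvStepA, hok, Bool.false_eq_true, if_false]

def pvLA (cs : List Char) (primes : Array Bool) (k : Nat) : List Int :=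
  (List.range (cs.length + 1)).map (fun j => if j ≤ k then pvF cs primes j else 0)

lemma pvLA_getD (cs : List Char) (primes : Array Bool) (k j : Nat) (hj : j ≤ cs.length) :
    (pvLA cs primes k).getD j 0 = if j ≤ k then pvF cs primes j else 0 := by
  rw [List.getD_eq_getElem _ _ (by simp [pvLA]; omega)]
  simp [pvLA]

lemma pvLA_zero (cs : List Char) (primes : Array Bool) :
    (List.replicate (cs.length + 1) (0 : Int)).set 0 1 = pvLA cs primes 0 := by
  apply List.ext_getElem
  · simp [pvLA]
  · intro j hj _
    simp only [pvLA, List.getElem_map, List.getElem_range]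
    rcases Nat.eq_zero_or_pos j with rfl | hj0
    · simp [pvF]
    · rw [List.getElem_set_ne (by omega)]
      simp [List.getElem_replicate]
      omega

lemma pvLA_set (cs : List Char) (primes : Array Bool) (k : Nat) (hk : k + 1 ≤ cs.length) :
    (pvLA cs primes k).set (k + 1) (pvF cs primes (k + 1)) = pvLA cs primes (k + 1) := by
  apply List.ext_getElem
  · simp [pvLA]
  · intro j hj _
    simp only [pvLA, List.getElem_map, List.getElem_range] at *
    by_cases hjk : j = k + 1
    · subst hjk
      rw [List.getElem_set_self (by simp [pvLA]; omega)]
      simp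
    · rw [List.getElem_set_ne (by omega)]
      simp only [pvLA, List.getElem_map, List.getElem_range]
      by_cases hle : j ≤ k
      · rw [if_pos hle, if_pos (by omega)]
      · rw [if_neg hle, if_neg (by omega)]

lemma pv_innerA_F (cs : List Char) (primes : Array Bool) (hd : cs.all Char.isDigit = true)
    (e : Nat) (he1 : 1 ≤ e) (he : e ≤ cs.length) :
    (pvWndD e).foldl (pvStepA cs primes (pvLA cs primes (e - 1)) e) 0 = pvF cs primes e := by
  have hcong : (pvWndD e).foldl (pvStepA cs primes (pvLA cs primes (e - 1)) e) 0
      = (pvWndD e).foldl (fun v stt => if pvOk cs primes stt e then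
          PySem.Int.mod (v + pvF cs primes stt) pvM else v) 0 := by
    apply PySem.List.foldl_congr_mem
    intro acc stt hstt
    have hw := mem_pvWndD.mp hstt
    have : (pvLA cs primes (e - 1)).getD stt 0 = pvF cs primes stt := by
      rw [pvLA_getD cs primes _ _ (by omega)]
      rw [if_pos (by omega)]
    simp only [pvStepA, this]
  rw [hcong]
  have h0 : (0 : Int) = PySem.Int.mod 0 pvM := pv_mod_zero.symm
  rw [h0, pv_foldl_mod (fun stt => pvOk cs primes stt e) (fun stt => pvF cs primes stt)]
  obtain ⟨e', rfl⟩ : ∃ e', e = e' + 1 := ⟨e - 1, by omega⟩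
  rw [pvF_succ]
  simp only [zero_add]
  rfl

lemma pv_windowA (e : Nat) (he : 1 ≤ e) :
    PySem.List.pyRange ((e : Int) - 1) (max (-1) ((e : Int) - 7)) (-1)
      = (pvWndD e).map (fun stt : Nat => (stt : Int)) := by
  rw [PySem.List.pyRange_neg_one]
  have harg : (((e : Int) - 1) - max (-1) ((e : Int) - 7)).toNat = min e 6 := by
    by_cases h : (e : Int) ≤ 6
    · rw [max_eq_left (by omega)]; omega
    · rw [max_eq_right (by omega)]; omega
  rw [harg]
  unfold pvWndD
  rw [List.map_map]
  apply List.map_congr_left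
  intro k hk
  simp only [List.mem_range] at hk
  simp only [Function.comp_apply]
  omega

-- the body of A's outer loop
abbrev pvBodyA (cs : List Char) (primes : Array Bool) : List Int → Int → List Int :=
  fun sols e => PySem.List.pySetD sols e
    (pvInnerA cs primes sols e (PySem.List.pyRange (e - 1) (max (-1) (e - 7)) (-1))
      (PySem.List.pyGetD sols e 0))

lemma pv_outerA (cs : List Char) (primes : Array Bool) (hd : cs.all Char.isDigit = true)
    (k : Nat) (hk : k ≤ cs.length) :
    (List.range k).foldl (fun (sols : List Int) (i : Nat) => pvBodyA cs primes sols (1 + (i : Int))) (pvLA cs primes 0)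
      = pvLA cs primes k := by
  induction k with
  | zero => rfl
  | succ k ih =>
    rw [List.range_succ, List.foldl_append, ih (by omega)]
    simp only [List.foldl_cons, List.foldl_nil]
    have hcast : 1 + (k : Int) = ((k + 1 : Nat) : Int) := by push_cast; ring
    rw [hcast]
    show PySem.List.pySetD (pvLA cs primes k) ((k + 1 : Nat) : Int) _ = _
    rw [PySem.List.pySetD_natCast]
    have hwnd : PySem.List.pyRange (((k + 1 : Nat) : Int) - 1) (max (-1) (((k + 1 : Nat) : Int) - 7)) (-1)
        = (pvWndD (k + 1)).map (fun stt : Nat => (stt : Int)) := pv_windowA (k + 1) (by omega)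
    rw [hwnd]
    have hget0 : PySem.List.pyGetD (pvLA cs primes k) ((k + 1 : Nat) : Int) 0 = 0 := by
      rw [PySem.List.pyGetD_natCast, pvLA_getD cs primes k (k + 1) (by omega)]
      rw [if_neg (by omega)]
    rw [hget0]
    rw [pvInnerA_eq_foldl cs primes _ hd (k + 1) (by omega) _
      (fun stt hstt => mem_pvWndD.mp hstt) 0]
    have : (pvWndD (k + 1)).foldl (pvStepA cs primes (pvLA cs primes k) (k + 1)) 0
        = pvF cs primes (k + 1) := by
      have := pv_innerA_F cs primes hd (k + 1) (by omega) (by omega)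
      simpa using this
    rw [this]
    exact pvLA_set cs primes k (by omega)

-- ===== B-side =====

def pvSB (cs : List Char) (primes : Array Bool) (k j : Nat) : Int :=
  PySem.Int.mod (((pvWndD j).filter (fun stt => decide (stt < k))).map (pvG cs primes j)).sum pvM

lemma pvSB_zero (cs : List Char) (primes : Array Bool) (j : Nat) : pvSB cs primes 0 j = 0 := by
  have : (pvWndD j).filter (fun stt => decide (stt < 0)) = [] := by
    apply List.filter_eq_nil_iff.mpr; intro x _; simp
  simp [pvSB, this, pv_mod_zero]

lemma pvSB_full (cs : List Char) (primes : Array Bool) (k j : Nat) (hj : 1 ≤ j) (hkj : j ≤ k) :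
    pvSB cs primes k j = pvF cs primes j := by
  have : (pvWndD j).filter (fun stt => decide (stt < k)) = pvWndD j := by
    apply List.filter_eq_self.mpr
    intro x hx
    have := mem_pvWndD.mp hx
    simp; omega
  rw [pvSB, this]
  obtain ⟨j', rfl⟩ : ∃ j', j = j' + 1 := ⟨j - 1, by omega⟩
  rw [pvF_succ]

lemma pvSB_succ (cs : List Char) (primes : Array Bool) (k j : Nat) :
    pvSB cs primes (k + 1) j =
      if k < j ∧ j ≤ k + 6 ∧ pvOk cs primes k j = true then
        PySem.Int.mod (pvSB cs primes k j + pvF cs primes k) pvM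
      else pvSB cs primes k j := by
  have hsum := pv_sum_filter_lt_succ (pvWndD j) (nodup_pvWndD j) k (pvG cs primes j)
  by_cases hmem : k ∈ pvWndD j
  · rw [pvSB, hsum, if_pos hmem]
    have hw := mem_pvWndD.mp hmem
    by_cases hok : pvOk cs primes k j = true
    · rw [if_pos ⟨hw.1, by omega, hok⟩]
      rw [pvSB]
      rw [pv_mod_absorb]
      simp [pvG, hok]
    · rw [if_neg (by tauto)]
      simp [pvSB, pvG, hok]
  · rw [pvSB, hsum, if_neg hmem]
    have hw := fun h1 h2 => hmem (mem_pvWndD.mpr ⟨h1, h2⟩)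
    rw [if_neg (by intro h; exact hw h.1 h.2.1)]
    simp [pvSB]

def pvLBmid (cs : List Char) (primes : Array Bool) (k e0 : Nat) : List Int :=
  (List.range (cs.length + 1)).map
    (fun j => if j = 0 then 1 else if j < e0 then pvSB cs primes (k + 1) j else pvSB cs primes k j)

def pvLB (cs : List Char) (primes : Array Bool) (k : Nat) : List Int :=
  (List.range (cs.length + 1)).map (fun j => if j = 0 then 1 else pvSB cs primes k j)

lemma pvLB_getD (cs : List Char) (primes : Array Bool) (k j : Nat) (hj : j ≤ cs.length) :
    (pvLB cs primes k).getD j 0 = if j = 0 then 1 else pvSB cs primes k j := by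
  rw [List.getD_eq_getElem _ _ (by simp [pvLB]; omega)]
  simp [pvLB]

lemma pvLBmid_getD (cs : List Char) (primes : Array Bool) (k e0 j : Nat) (hj : j ≤ cs.length) :
    (pvLBmid cs primes k e0).getD j 0
      = if j = 0 then 1 else if j < e0 then pvSB cs primes (k + 1) j else pvSB cs primes k j := by
  rw [List.getD_eq_getElem _ _ (by simp [pvLBmid]; omega)]
  simp [pvLBmid]

lemma pvLB_zero (cs : List Char) (primes : Array Bool) :
    (List.replicate (cs.length + 1) (0 : Int)).set 0 1 = pvLB cs primes 0 := by
  rw [pvLA_zero cs primes]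
  apply List.ext_getElem
  · simp [pvLA, pvLB]
  · intro j hj _
    simp only [pvLA, pvLB, List.getElem_map, List.getElem_range]
    rcases Nat.eq_zero_or_pos j with rfl | hj0
    · simp [pvF]
    · rw [if_neg (by omega), if_neg (by omega), pvSB_zero]

lemma pvLBmid_start (cs : List Char) (primes : Array Bool) (k : Nat) :
    pvLBmid cs primes k (k + 1) = pvLB cs primes k := by
  apply List.ext_getElem
  · simp [pvLBmid, pvLB]
  · intro j hj _
    have hjn : j ≤ cs.length := by
      simp only [pvLBmid, List.length_map, List.length_range] at hj; omega
    simp only [pvLBmid, pvLB, List.getElem_map, List.getElem_range]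
    rcases Nat.eq_zero_or_pos j with rfl | hj0
    · simp
    · rw [if_neg (by omega)]
      by_cases hje : j < k + 1
      · rw [if_pos hje, pvSB_succ, if_neg (by rintro ⟨hh, -, -⟩; omega), if_neg (by omega)]
      · rw [if_neg hje, if_neg (by omega)]

lemma pvLBmid_end (cs : List Char) (primes : Array Bool) (k : Nat) (hk : k < cs.length) :
    pvLBmid cs primes k (k + 1 + min (cs.length - k) 6) = pvLB cs primes (k + 1) := by
  apply List.ext_getElem
  · simp [pvLBmid, pvLB]
  · intro j hj _
    have hjn : j ≤ cs.length := by
      simp only [pvLBmid, List.length_map, List.length_range] at hj; omega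
    simp only [pvLBmid, pvLB, List.getElem_map, List.getElem_range]
    rcases Nat.eq_zero_or_pos j with rfl | hj0
    · simp
    · rw [if_neg (by omega)]
      by_cases hje : j < k + 1 + min (cs.length - k) 6
      · rw [if_pos hje, if_neg (by omega)]
      · rw [if_neg hje, pvSB_succ, if_neg (by rintro ⟨hh1, hh2, -⟩; omega), if_neg (by omega)]

lemma pvLBmid_set (cs : List Char) (primes : Array Bool) (k e0 : Nat) (he0 : 1 ≤ e0)
    (he : e0 ≤ cs.length) :
    (pvLBmid cs primes k e0).set e0 (pvSB cs primes (k + 1) e0) = pvLBmid cs primes k (e0 + 1) := by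
  apply List.ext_getElem
  · simp [pvLBmid]
  · intro j hj _
    have hjn : j ≤ cs.length := by
      simp only [List.length_set, pvLBmid, List.length_map, List.length_range] at hj; omega
    by_cases hje : j = e0
    · subst hje
      rw [List.getElem_set_self (by simp [pvLBmid]; omega)]
      simp only [pvLBmid, List.getElem_map, List.getElem_range]
      rw [if_neg (by omega), if_pos (by omega)]
    · rw [List.getElem_set_ne (by omega)]
      simp only [pvLBmid, List.getElem_map, List.getElem_range]
      rcases Nat.eq_zero_or_pos j with rfl | hj0
      · simp
      · rw [if_neg (by omega)]
        by_cases hlt : j < e0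
        · rw [if_pos hlt, if_neg (by omega), if_pos (by omega)]
        · rw [if_neg hlt, if_neg (by omega), if_neg (by omega)]

lemma pvLBmid_skip (cs : List Char) (primes : Array Bool) (k e0 : Nat)
    (hok : pvOk cs primes k e0 = false) :
    pvLBmid cs primes k e0 = pvLBmid cs primes k (e0 + 1) := by
  apply List.ext_getElem
  · simp [pvLBmid]
  · intro j hj _
    simp only [pvLBmid, List.getElem_map, List.getElem_range]
    by_cases hje : j = e0
    · subst hje
      rcases Nat.eq_zero_or_pos j with rfl | h0
      · simp
      · rw [if_neg (by omega), if_neg (by omega), if_neg (by omega), if_pos (by omega)]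
        rw [pvSB_succ, if_neg (by simp [hok])]
    · rcases Nat.eq_zero_or_pos j with rfl | hj0
      · simp
      · rw [if_neg (by omega)]
        by_cases hlt : j < e0
        · rw [if_pos hlt, if_neg (by omega), if_pos (by omega)]
        · rw [if_neg hlt, if_neg (by omega), if_neg (by omega)]

lemma pv_innerB_LBmid (cs : List Char) (primes : Array Bool) (hd : cs.all Char.isDigit = true)
    (k : Nat) (hk : k < cs.length) (h0 : (cs.getD k ' ' == '0') = false) :
    ∀ (m e0 : Nat), k + 1 ≤ e0 → e0 + m ≤ cs.length + 1 → e0 + m ≤ k + 7 →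
    pvInnerB cs primes (k : Int) ((List.range' e0 m).map (fun e : Nat => (e : Int)))
        (pvDigitsVal ((cs.drop k).take (e0 - 1 - k))) (pvLBmid cs primes k e0)
      = pvLBmid cs primes k (e0 + m) := by
  intro m
  induction m with
  | zero => intro e0 _ _ _; rfl
  | succ m ih =>
    intro e0 h1 h2 h3
    rw [List.range'_succ, List.map_cons]
    have he0n : e0 ≤ cs.length := by omega
    have he01 : 1 ≤ e0 := by omega
    -- the digit appended
    have hidx : e0 - 1 < cs.length := by omega
    have htake : (cs.drop k).take (e0 - k) = (cs.drop k).take (e0 - 1 - k) ++ [cs[e0 - 1]] := by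
      have hstep : e0 - k = (e0 - 1 - k) + 1 := by omega
      rw [hstep, List.take_add_one]
      congr 1
      rw [List.getElem?_drop]
      have hkk : k + (e0 - 1 - k) = e0 - 1 := by omega
      rw [hkk, List.getElem?_eq_getElem hidx]
      rfl
    have hnum : pvDigitsVal ((cs.drop k).take (e0 - 1 - k)) * 10
          + (((PySem.List.pyGetD cs ((e0 : Int) - 1) ' ').toNat : Int) - 48)
        = pvDigitsVal ((cs.drop k).take (e0 - k)) := by
      have hc : PySem.List.pyGetD cs ((e0 : Int) - 1) ' ' = cs[e0 - 1] := by
        have hcast : (e0 : Int) - 1 = ((e0 - 1 : Nat) : Int) := by omega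
        rw [hcast, PySem.List.pyGetD_natCast, List.getD_eq_getElem _ _ hidx]
      rw [hc, htake, pvDigitsVal_snoc]
      ring
    show pvInnerB cs primes (k : Int) _ _ _ = _
    rw [pvInnerB]
    simp only [hnum]
    have hgete : PySem.List.pyGetD (pvLBmid cs primes k e0) (e0 : Int) 0 = pvSB cs primes k e0 := by
      rw [PySem.List.pyGetD_natCast, pvLBmid_getD cs primes k e0 e0 he0n]
      rw [if_neg (by omega), if_neg (by omega)]
    have hgetk : PySem.List.pyGetD (pvLBmid cs primes k e0) (k : Int) 0 = pvF cs primes k := by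
      rw [PySem.List.pyGetD_natCast, pvLBmid_getD cs primes k e0 k (by omega)]
      rcases Nat.eq_zero_or_pos k with rfl | hk0
      · simp [pvF]
      · rw [if_neg (by omega), if_pos (by omega), pvSB_succ]
        rw [if_neg (by omega), pvSB_full cs primes k k (by omega) le_rfl]
    by_cases hp : primes.getD (pvDigitsVal ((cs.drop k).take (e0 - k))).toNat false
    · rw [if_pos hp, hgete, hgetk]
      have hok : pvOk cs primes k e0 = true := by unfold pvOk; rw [h0, hp]; rfl
      have hnew : PySem.Int.mod (pvSB cs primes k e0 + pvF cs primes k) 1000000007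
          = pvSB cs primes (k + 1) e0 := by
        rw [show (1000000007 : Int) = pvM from rfl, pvSB_succ cs primes k e0,
          if_pos ⟨by omega, by omega, hok⟩]
      rw [hnew]
      rw [show PySem.List.pySetD (pvLBmid cs primes k e0) (e0 : Int) (pvSB cs primes (k+1) e0)
          = (pvLBmid cs primes k e0).set e0 (pvSB cs primes (k+1) e0) from PySem.List.pySetD_natCast _ _ _]
      rw [pvLBmid_set cs primes k e0 he01 he0n]
      have := ih (e0 + 1) (by omega) (by omega) (by omega)
      have harg : e0 + 1 - 1 - k = e0 - k := by omega
      rw [harg] at this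
      rw [this]
      congr 1
      omega
    · rw [if_neg hp]
      have hpf : primes.getD (pvDigitsVal (List.take (e0 - k) (List.drop k cs))).toNat false = false := by
        cases hpp : primes.getD (pvDigitsVal (List.take (e0 - k) (List.drop k cs))).toNat false
        · rfl
        · exact absurd hpp hp
      have hok : pvOk cs primes k e0 = false := by unfold pvOk; rw [hpf]; simp
      rw [pvLBmid_skip cs primes k e0 hok]
      have := ih (e0 + 1) (by omega) (by omega) (by omega)
      have harg : e0 + 1 - 1 - k = e0 - k := by omega
      rw [harg] at this
      rw [this]
      congr 1
      omega

-- the body of B's outer loop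
abbrev pvBodyB (cs : List Char) (primes : Array Bool) : List Int → Int → List Int :=
  fun sols stt =>
    if PySem.List.pyGetD cs stt ' ' == '0' then sols
    else pvInnerB cs primes stt
      (PySem.List.pyRange (stt + 1) (min ((cs.length : Int)) (stt + 6) + 1) 1) 0 sols

lemma pv_windowB (n k : Nat) (hk : k < n) :
    PySem.List.pyRange ((k : Int) + 1) (min (n : Int) ((k : Int) + 6) + 1) 1
      = (List.range' (k + 1) (min (n - k) 6)).map (fun e : Nat => (e : Int)) := by
  rw [PySem.List.pyRange_one]
  have harg : (min (n : Int) ((k : Int) + 6) + 1 - ((k : Int) + 1)).toNat = min (n - k) 6 := by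
    by_cases h : (n : Int) ≤ (k : Int) + 6
    · rw [min_eq_left h]; omega
    · rw [min_eq_right (by omega)]; omega
  rw [harg, List.range'_eq_map_range, List.map_map]
  apply List.map_congr_left
  intro i hi
  simp only [Function.comp_apply]
  push_cast
  ring

lemma pv_outerB (cs : List Char) (primes : Array Bool) (hd : cs.all Char.isDigit = true)
    (k : Nat) (hk : k ≤ cs.length) :
    (List.range k).foldl (fun (sols : List Int) (i : Nat) => pvBodyB cs primes sols (i : Int)) (pvLB cs primes 0)
      = pvLB cs primes k := by
  induction k with
  | zero => rfl
  | succ k ih =>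
    rw [List.range_succ, List.foldl_append, ih (by omega)]
    simp only [List.foldl_cons, List.foldl_nil]
    show pvBodyB cs primes (pvLB cs primes k) (k : Int) = _
    have hgetk : PySem.List.pyGetD cs (k : Int) ' ' = cs.getD k ' ' := by simp
    by_cases h0 : (cs.getD k ' ' == '0') = true
    · rw [show pvBodyB cs primes (pvLB cs primes k) (k : Int) = pvLB cs primes k by
        simp only [pvBodyB, hgetk, h0, if_true]]
      -- skipping a '0' start changes nothing
      apply List.ext_getElem
      · simp [pvLB]
      · intro j hj _
        simp only [pvLB, List.getElem_map, List.getElem_range] at *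
        rcases Nat.eq_zero_or_pos j with rfl | hj0
        · simp
        · have hokf : pvOk cs primes k j = false := by unfold pvOk; rw [h0]; rfl
          rw [if_neg (by omega), if_neg (by omega), pvSB_succ]
          rw [if_neg (by simp [hokf])]
    · simp only [pvBodyB, hgetk, h0, if_false, Bool.false_eq_true]
      rw [pv_windowB cs.length k (by omega)]
      have hnum0 : (0 : Int) = pvDigitsVal ((cs.drop k).take (k + 1 - 1 - k)) := by
        simp [pvDigitsVal]
      rw [hnum0, ← pvLBmid_start cs primes k]
      rw [pv_innerB_LBmid cs primes hd k (by omega) (by simpa using h0) (min (cs.length - k) 6)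
        (k + 1) (by omega) (by omega) (by omega)]
      exact pvLBmid_end cs primes k (by omega)

-- ===== assembling both ports =====

lemma pv_A_eq (cs : List Char) (primes : Array Bool) (hd : cs.all Char.isDigit = true) :
    (PySem.List.pyRange 1 ((cs.length : Int) + 1) 1).foldl
        (fun sols e => PySem.List.pySetD sols e
          (pvInnerA cs primes sols e (PySem.List.pyRange (e - 1) (max (-1) (e - 7)) (-1))
            (PySem.List.pyGetD sols e 0)))
        ((List.replicate (cs.length + 1) (0 : Int)).set 0 1)
      = pvLA cs primes cs.length := by
  rw [PySem.List.pyRange_one]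
  have harg : (((cs.length : Int) + 1) - 1).toNat = cs.length := by omega
  rw [harg, List.foldl_map, pvLA_zero cs primes]
  exact pv_outerA cs primes hd cs.length le_rfl

lemma pv_B_eq (cs : List Char) (primes : Array Bool) (hd : cs.all Char.isDigit = true) :
    (PySem.List.pyRange 0 (cs.length : Int) 1).foldl
        (fun sols stt =>
          if PySem.List.pyGetD cs stt ' ' == '0' then sols
          else pvInnerB cs primes stt
            (PySem.List.pyRange (stt + 1) (min ((cs.length : Int)) (stt + 6) + 1) 1) 0 sols)
        ((List.replicate (cs.length + 1) (0 : Int)).set 0 1)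
      = pvLB cs primes cs.length := by
  rw [PySem.List.pyRange_zero_natCast, List.foldl_map, pvLB_zero cs primes]
  exact pv_outerB cs primes hd cs.length le_rfl

lemma pv_final_A (cs : List Char) (primes : Array Bool) :
    PySem.List.pyGetD (pvLA cs primes cs.length) (-1) 0 = pvF cs primes cs.length := by
  have hne : pvLA cs primes cs.length ≠ [] := by
    intro h; have := congrArg List.length h; simp [pvLA] at this
  rw [PySem.List.pyGetD_neg_one (pvLA cs primes cs.length) 0 hne, List.getLast_eq_getElem]
  simp only [pvLA, List.length_map, List.length_range]
  simp only [pvLA, List.getElem_map, List.getElem_range]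
  rw [if_pos (by omega)]
  congr 1

lemma pv_final_B (cs : List Char) (primes : Array Bool) :
    PySem.List.pyGetD (pvLB cs primes cs.length) ((cs.length : Int)) 0 = pvF cs primes cs.length := by
  rw [PySem.List.pyGetD_natCast, pvLB_getD cs primes cs.length cs.length le_rfl]
  rcases Nat.eq_zero_or_pos cs.length with h | h
  · simp [h, pvF]
  · rw [if_neg (by omega)]
    exact pvSB_full cs primes cs.length cs.length (by omega) le_rfl

-- ===== VERDICT (by name: the statement is the Claim_ definition above) =====
theorem countPrimeStrings_spec : Claim_equal_countPrimeStrings := by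
  intro s _ hpre
  unfold Spec_countPrimeStrings countPrimeStrings countPrimeStrings_alt
  simp only []
  rw [pv_A_eq s.toList (generatePrimes 1000000) hpre, pv_B_eq s.toList (generatePrimes 1000000) hpre]
  rw [pv_final_A, pv_final_B]
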